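-- pv_equiv track=rewrite | github.com/dair-iitd/OxKBC | Rule-Mining-Distmult/utils.py | get_relation_dict
-- ===== SOURCE A (Python) =====
-- def get_relation_dict(data_arr):
--     relation_dict={}
--     count={}
--
--     for data in data_arr:
--         if data[1] not in relation_dict:
--             relation_dict[data[1]]=[]
--             count[data[1]]=0
--         relation_dict[data[1]].append((data[0],data[2]))
--         count[data[1]]+=1
--
--     return count,relation_dict
-- ===== SOURCE B (Python) =====
-- def get_relation_dict(data_arr):
--     rels = list(dict.fromkeys(d[1] for d in data_arr))
--     relation_dict = {r: [(d[0], d[2]) for d in data_arr if d[1] == r] for r in rels}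
--     count = {r: len(ps) for r, ps in relation_dict.items()}
--     return count, relation_dict
-- ===== Notes on version B (the rewrite author's own statement) =====
-- stated objective: alternative
-- what changed: B abandons A's single-pass incremental dict building: it first computes the first-occurrence-ordered distinct relations via dict.fromkeys, then for each relation performs a separate filtering scan of data_arr to collect its (head,tail) pairs, and derives counts from group lengths; O(n*k) nested scans instead of A's one-pass grouping.
import Mathlib
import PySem

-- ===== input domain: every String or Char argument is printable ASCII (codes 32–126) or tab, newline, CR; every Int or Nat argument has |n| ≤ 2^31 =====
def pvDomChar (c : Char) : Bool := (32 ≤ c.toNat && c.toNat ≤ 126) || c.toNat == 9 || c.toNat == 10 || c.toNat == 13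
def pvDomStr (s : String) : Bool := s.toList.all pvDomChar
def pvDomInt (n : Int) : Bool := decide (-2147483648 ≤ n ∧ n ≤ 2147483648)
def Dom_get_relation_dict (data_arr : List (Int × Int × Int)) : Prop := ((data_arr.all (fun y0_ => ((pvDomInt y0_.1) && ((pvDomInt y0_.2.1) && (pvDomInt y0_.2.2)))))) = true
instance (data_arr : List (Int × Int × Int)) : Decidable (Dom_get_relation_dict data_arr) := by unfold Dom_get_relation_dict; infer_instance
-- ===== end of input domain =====

-- B replaces A's one-pass incremental grouping by staged passes: first the
-- distinct relations in first-occurrence order, then one filtering scan of the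
-- input per relation, with counts derived from group lengths (objective: alternative).

-- ===== PORT A =====
-- A keeps two dicts in lockstep: on a fresh relation it seeds both, then appends
-- the pair and bumps the count.  dict[k] += 1 / .append are ported as Dict.modify.
def get_relation_dict (data_arr : List (Int × Int × Int)) :
    (List (Int × Int)) × (List (Int × List (Int × Int))) :=
  let st := data_arr.foldl
    (fun (st : PySem.Dict Int (List (Int × Int)) × PySem.Dict Int Int) data =>
      ((if st.1.contains data.2.1 then st.1 else st.1.insert data.2.1 []).modify
          data.2.1 [] (· ++ [(data.1, data.2.2)]),
       (if st.1.contains data.2.1 then st.2 else st.2.insert data.2.1 0).modify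
          data.2.1 0 (· + 1)))
    (PySem.Dict.empty, PySem.Dict.empty)
  (st.2.items, st.1.items)

-- ===== PORT B =====
-- list(dict.fromkeys(…)) is PySem.List.dedup; the comprehension with a filter is filterMap.
def get_relation_dict_alt (data_arr : List (Int × Int × Int)) :
    (List (Int × Int)) × (List (Int × List (Int × Int))) :=
  let rels := PySem.List.dedup (data_arr.map (fun d => d.2.1))
  let rd := rels.map (fun r =>
      (r, data_arr.filterMap (fun d => if d.2.1 = r then some (d.1, d.2.2) else none)))
  let count := rd.map (fun p => (p.1, PySem.List.len p.2))
  (count, rd)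

-- ===== PRECONDITION & SPEC =====
def Spec_get_relation_dict (data_arr : List (Int × Int × Int)) (out : (List (Int × Int)) × (List (Int × List (Int × Int)))) : Prop := out = get_relation_dict_alt data_arr
instance (data_arr : List (Int × Int × Int)) (out : (List (Int × Int)) × (List (Int × List (Int × Int)))) : Decidable (Spec_get_relation_dict data_arr out) := by unfold Spec_get_relation_dict; infer_instance

-- ===== CLAIM (what is proved, stated in full; the proofs are below) =====
def Claim_equal_get_relation_dict : Prop := ∀ (data_arr : List (Int × Int × Int)), Dom_get_relation_dict data_arr → Spec_get_relation_dict data_arr (get_relation_dict data_arr)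

-- ===== LEMMAS AND PROOFS =====

-- B's per-relation filtering scan
def pvPairs (l : List (Int × Int × Int)) (r : Int) : List (Int × Int) :=
  l.filterMap (fun d => if d.2.1 = r then some (d.1, d.2.2) else none)

-- A's grouping loop in isolation
def pvG (l : List (Int × Int × Int)) (d : PySem.Dict Int (List (Int × Int))) :
    PySem.Dict Int (List (Int × Int)) :=
  l.foldl (fun rd data => rd.modify data.2.1 [] (· ++ [(data.1, data.2.2)])) d

-- the value-to-count projection relating the two dicts
def pvLen (p : Int × List (Int × Int)) : Int × Int := (p.1, PySem.List.len p.2)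

-- A's conditional seeding followed by modify collapses to a bare modify
lemma pvSeedModify (d : PySem.Dict Int (List (Int × Int))) (r : Int) (x : Int × Int) :
    (if d.contains r then d else d.insert r []).modify r [] (· ++ [x])
      = d.modify r [] (· ++ [x]) := by
  split_ifs with h
  · rfl
  · rw [Bool.not_eq_true] at h
    show (d.insert r []).insert r (((d.insert r []).getD r []) ++ [x])
        = d.insert r ((d.getD r []) ++ [x])
    rw [PySem.Dict.getD_insert_self, PySem.Dict.insert_insert_self,
        PySem.Dict.getD_of_not_contains d _ h]

-- modify preserves key uniqueness
lemma pvNodupModify (d : PySem.Dict Int (List (Int × Int))) (r : Int) (x : Int × Int)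
    (hnd : d.keys.Nodup) : (d.modify r [] (· ++ [x])).keys.Nodup :=
  PySem.Dict.nodup_keys_insert d r _ hnd

lemma pvKeysEq (c : PySem.Dict Int Int) (d : PySem.Dict Int (List (Int × Int)))
    (hc : c.items = d.items.map pvLen) : c.keys = d.keys := by
  simp only [PySem.Dict.keys, hc, List.map_map]
  rfl

-- one step of A preserves the count-is-length-of-group relation
lemma pvStepInv (c : PySem.Dict Int Int) (d : PySem.Dict Int (List (Int × Int)))
    (r : Int) (x : Int × Int) (hnd : d.keys.Nodup) (hc : c.items = d.items.map pvLen) :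
    ((if d.contains r then c else c.insert r 0).modify r 0 (· + 1)).items
      = (d.modify r [] (· ++ [x])).items.map pvLen := by
  have hkeys := pvKeysEq c d hc
  split_ifs with h
  · obtain ⟨v, hv⟩ : ∃ v, d.get? r = some v := by
      rw [PySem.Dict.contains_eq_isSome_get?] at h
      exact Option.isSome_iff_exists.mp h
    have hcc : c.contains r = true := by
      rw [PySem.Dict.contains_iff_mem_keys, hkeys,
          ← PySem.Dict.contains_iff_mem_keys]; exact h
    have hmemd : (r, v) ∈ d.items := PySem.Dict.mem_items_of_get?_eq_some d hv
    have hmemc : (r, PySem.List.len v) ∈ c.items := by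
      rw [hc]; exact List.mem_map.mpr ⟨(r, v), hmemd, rfl⟩
    have hndc : c.keys.Nodup := by rw [hkeys]; exact hnd
    have hcg : c.getD r 0 = PySem.List.len v :=
      PySem.Dict.getD_of_mem_items c hmemc hndc 0
    have hdg : d.getD r [] = v := PySem.Dict.getD_of_get?_eq_some d [] hv
    show ((c.insert r (c.getD r 0 + 1)).items)
        = ((d.insert r (d.getD r [] ++ [x])).items).map pvLen
    rw [PySem.Dict.items_insert_of_contains _ _ hcc,
        PySem.Dict.items_insert_of_contains _ _ h, hc, hcg, hdg,
        List.map_map, List.map_map]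
    refine List.map_congr_left (fun q hq => ?_)
    by_cases hqr : q.1 = r
    · simp [pvLen, hqr, PySem.List.len_eq]
    · simp [pvLen, hqr]
  · rw [Bool.not_eq_true] at h
    have hcc : c.contains r = false := by
      rw [Bool.eq_false_iff] at h ⊢
      intro hx; apply h
      rw [PySem.Dict.contains_iff_mem_keys, ← hkeys,
          ← PySem.Dict.contains_iff_mem_keys]; exact hx
    show ((c.insert r 0).insert r ((c.insert r 0).getD r 0 + 1)).items
        = (d.insert r ((d.getD r []) ++ [x])).items.map pvLen
    rw [PySem.Dict.getD_insert_self, PySem.Dict.insert_insert_self,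
        PySem.Dict.getD_of_not_contains d _ h,
        PySem.Dict.items_insert_of_not_contains _ _ hcc,
        PySem.Dict.items_insert_of_not_contains _ _ h, hc, List.map_append]
    simp [pvLen, PySem.List.len_eq]

-- A's paired loop projects to the grouping loop, with counts as lengths
lemma pvLoop (l : List (Int × Int × Int)) (c : PySem.Dict Int Int)
    (d : PySem.Dict Int (List (Int × Int))) (hnd : d.keys.Nodup)
    (hc : c.items = d.items.map pvLen) :
    (l.foldl
      (fun (st : PySem.Dict Int (List (Int × Int)) × PySem.Dict Int Int) data =>
        ((if st.1.contains data.2.1 then st.1 else st.1.insert data.2.1 []).modify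
            data.2.1 [] (· ++ [(data.1, data.2.2)]),
         (if st.1.contains data.2.1 then st.2 else st.2.insert data.2.1 0).modify
            data.2.1 0 (· + 1))) (d, c)).1
      = pvG l d
    ∧ (l.foldl
      (fun (st : PySem.Dict Int (List (Int × Int)) × PySem.Dict Int Int) data =>
        ((if st.1.contains data.2.1 then st.1 else st.1.insert data.2.1 []).modify
            data.2.1 [] (· ++ [(data.1, data.2.2)]),
         (if st.1.contains data.2.1 then st.2 else st.2.insert data.2.1 0).modify
            data.2.1 0 (· + 1))) (d, c)).2.items
      = (pvG l d).items.map pvLen := by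
  induction l generalizing c d with
  | nil => exact ⟨rfl, hc⟩
  | cons a tl ih =>
    simp only [List.foldl_cons, pvG]
    rw [pvSeedModify d a.2.1 (a.1, a.2.2)]
    exact ih _ _ (pvNodupModify d a.2.1 (a.1, a.2.2) hnd)
      (pvStepInv c d a.2.1 (a.1, a.2.2) hnd hc)

-- values under the grouping loop: the seed's group extended by the matching pairs
lemma pvGetD (l : List (Int × Int × Int)) (d : PySem.Dict Int (List (Int × Int))) (r : Int) :
    (pvG l d).getD r [] = d.getD r [] ++ pvPairs l r := by
  induction l generalizing d with
  | nil => simp [pvG, pvPairs]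
  | cons a tl ih =>
    simp only [pvG, List.foldl_cons] at *
    rw [ih]
    by_cases hq : a.2.1 = r
    · subst hq
      rw [PySem.Dict.getD_modify_self]
      simp [pvPairs]
    · rw [PySem.Dict.getD_modify_of_ne _ [] _ (fun h => hq h.symm)]
      simp [pvPairs, hq]

-- keys of the grouping loop from the empty dict: distinct relations in order
lemma pvGKeys (l : List (Int × Int × Int)) :
    (pvG l PySem.Dict.empty).keys = PySem.List.dedup (l.map (fun d => d.2.1)) := by
  have h := PySem.Dict.keys_foldl_modify_key l (fun d => d.2.1) ([] : List (Int × Int))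
    (fun _ data v => v ++ [(data.1, data.2.2)]) PySem.Dict.empty
  exact h.trans (by rw [PySem.Dict.keys_empty, PySem.List.dedup_eq_ofList]; rfl)

-- a dict with distinct keys is determined by its keys and lookups
lemma pvItemsChar (d : PySem.Dict Int (List (Int × Int))) (hnd : d.keys.Nodup) :
    d.items = d.keys.map (fun r => (r, d.getD r [])) := by
  conv_lhs => rw [show d.items = d.items.map id from (List.map_id _).symm]
  rw [show d.keys = d.items.map Prod.fst from rfl, List.map_map]
  refine List.map_congr_left (fun p hp => ?_)
  have h := PySem.Dict.get?_of_mem_items d hp hnd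
  have hg : d.getD p.1 [] = p.2 := PySem.Dict.getD_of_get?_eq_some d [] h
  simp [Function.comp, hg]

lemma pvGNodup (l : List (Int × Int × Int)) : (pvG l PySem.Dict.empty).keys.Nodup := by
  rw [pvGKeys]; exact PySem.List.nodup_dedup _

-- ===== VERDICT (by name: the statement is the Claim_ definition above) =====
theorem get_relation_dict_spec : Claim_equal_get_relation_dict := by
  intro data_arr _
  unfold Spec_get_relation_dict get_relation_dict get_relation_dict_alt
  obtain ⟨h1, h2⟩ := pvLoop data_arr PySem.Dict.empty PySem.Dict.empty
    (by rw [PySem.Dict.keys_empty]; exact List.nodup_nil) rfl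
  have hitems : (pvG data_arr PySem.Dict.empty).items
      = (PySem.List.dedup (data_arr.map (fun d => d.2.1))).map
          (fun r => (r, pvPairs data_arr r)) := by
    rw [pvItemsChar _ (pvGNodup data_arr), pvGKeys]
    refine List.map_congr_left (fun r _ => ?_)
    rw [pvGetD]
    simp [PySem.Dict.getD_empty]
  simp only [h1, h2, hitems, List.map_map]
  exact Prod.ext rfl rfl
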